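-- pv_equiv track=rewrite | github.com/dermo64/advent2020 | day10/day10.py | part1
-- ===== SOURCE A (Python) =====
-- def part1(data):
--     jolt_deltas = list()
--     joltage = 0
--     for i in data:
--         jolt_deltas.append(i-joltage)
--         joltage = i
--     part1 = jolt_deltas.count(1) * (jolt_deltas.count(3))
--     return part1
-- ===== SOURCE B (Python) =====
-- def part1(data):
--     # Divide and conquer: (ones, threes) delta counts of segment lst whose predecessor value is prev.
--     def go(prev, lst):
--         n = len(lst)
--         if n == 0:
--             return (0, 0)
--         if n == 1:
--             d = lst[0] - prev
--             return (1 if d == 1 else 0, 1 if d == 3 else 0)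
--         mid = n // 2
--         left = lst[:mid]
--         o1, t1 = go(prev, left)
--         o2, t2 = go(left[-1], lst[mid:])
--         return (o1 + o2, t1 + t2)
--     ones, threes = go(0, data)
--     return ones * threes
-- ===== Notes on version B (the rewrite author's own statement) =====
-- stated objective: alternative
-- what changed: B replaces A's sequential build-a-deltas-list-then-two-count-scans with a divide-and-conquer recursion that splits the list in half, counts (ones, threes) in each half (the right half's predecessor being the left half's last element) and adds the pairs.
import Mathlib
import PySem

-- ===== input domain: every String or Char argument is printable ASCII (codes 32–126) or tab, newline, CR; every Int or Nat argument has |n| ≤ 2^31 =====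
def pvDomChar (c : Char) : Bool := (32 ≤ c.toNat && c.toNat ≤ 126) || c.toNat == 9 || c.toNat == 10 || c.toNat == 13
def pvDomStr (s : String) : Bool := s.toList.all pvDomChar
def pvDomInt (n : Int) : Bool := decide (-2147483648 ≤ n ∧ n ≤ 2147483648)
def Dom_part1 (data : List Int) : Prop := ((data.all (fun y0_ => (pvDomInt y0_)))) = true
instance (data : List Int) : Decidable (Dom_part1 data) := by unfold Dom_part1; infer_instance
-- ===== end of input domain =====

-- B replaces A's sequential build-a-deltas-list-then-two-count-scans by a divide-and-conquer
-- recursion that splits the list in half and adds the (ones, threes) pairs; objective: alternative.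

-- ===== PORT A =====
-- A: build jolt_deltas by appending i - joltage for each i, then multiply the two counts.
def part1 (data : List Int) : Int :=
  let st := data.foldl (fun (s : List Int × Int) i => (s.1 ++ [i - s.2], i)) ([], 0)
  (PySem.List.count st.1 1) * (PySem.List.count st.1 3)

-- ===== PORT B =====
-- B: go(prev, lst) = (ones, threes) delta counts of segment lst whose predecessor is prev,
-- computed by splitting lst at its midpoint (left[-1] becomes the right half's predecessor).
def part1Go : Nat → Int → List Int → Int × Int
  | 0, _, _ => (0, 0)   -- fuel exhausted; never reached when fuel ≥ lst.length (totality guard)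
  | fuel + 1, prev, lst =>
    if lst.length = 0 then (0, 0)
    else if lst.length = 1 then
      -- lst[0]; lst is nonempty here (the getD default is a totality guard)
      ((if lst.getD 0 0 - prev = 1 then 1 else 0), (if lst.getD 0 0 - prev = 3 then 1 else 0))
    else
      let p1 := part1Go fuel prev (lst.take (lst.length / 2))
      -- left[-1]; left = lst.take (lst.length / 2) is nonempty here
      let p2 := part1Go fuel ((lst.take (lst.length / 2)).getLastD 0) (lst.drop (lst.length / 2))
      (p1.1 + p2.1, p1.2 + p2.2)

def part1_alt (data : List Int) : Int :=
  let p := part1Go data.length 0 data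
  p.1 * p.2

-- ===== PRECONDITION & SPEC =====
def Spec_part1 (data : List Int) (out : Int) : Prop := out = part1_alt data
instance (data : List Int) (out : Int) : Decidable (Spec_part1 data out) := by unfold Spec_part1; infer_instance

-- ===== CLAIM (what is proved, stated in full; the proofs are below) =====
def Claim_equal_part1 : Prop := ∀ (data : List Int), Dom_part1 data → Spec_part1 data (part1 data)

-- ===== LEMMAS AND PROOFS =====

-- The list of successive differences with predecessor p (A's jolt_deltas).
def pvDeltas (p : Int) : List Int → List Int
  | [] => []
  | x :: xs => (x - p) :: pvDeltas x xs

lemma pvGL (xs : List Int) : ∀ (x p : Int), (x :: xs).getLast?.getD p = xs.getLast?.getD x := by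
  induction xs with
  | nil => intro x p; simp
  | cons y ys ih => intro x p; rw [List.getLast?_cons_cons, ih y p, ih y x]

lemma pvLastD_irrel {l : List Int} (h : l ≠ []) (a b : Int) : l.getLastD a = l.getLastD b := by
  cases l with
  | nil => exact absurd rfl h
  | cons x xs => rw [List.getLastD_cons, List.getLastD_cons]

lemma pvDeltas_append (l1 l2 : List Int) (p : Int) :
    pvDeltas p (l1 ++ l2) = pvDeltas p l1 ++ pvDeltas (l1.getLastD p) l2 := by
  induction l1 generalizing p with
  | nil => simp [pvDeltas]
  | cons x xs ih =>
    simp [pvDeltas, ih]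
    rw [pvGL]

-- A's fold builds exactly pvDeltas (with the running last element as second component).
lemma aFold_eq (data : List Int) (ds : List Int) (j : Int) :
    data.foldl (fun (s : List Int × Int) i => (s.1 ++ [i - s.2], i)) (ds, j)
      = (ds ++ pvDeltas j data, data.getLastD j) := by
  induction data generalizing ds j with
  | nil => simp [pvDeltas]
  | cons x xs ih =>
    simp [pvDeltas, ih]
    rw [pvGL]

-- B's divide-and-conquer computes the two counts of pvDeltas (fuel suffices when ≥ length).
lemma part1Go_eq (fuel : Nat) : ∀ (lst : List Int) (prev : Int), lst.length ≤ fuel →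
    part1Go fuel prev lst = (((pvDeltas prev lst).count 1 : Int), ((pvDeltas prev lst).count 3 : Int)) := by
  induction fuel with
  | zero =>
    intro lst prev h
    have : lst = [] := List.eq_nil_of_length_eq_zero (Nat.le_zero.mp h)
    subst this
    simp [part1Go, pvDeltas]
  | succ f ih =>
    intro lst prev h
    by_cases h0 : lst.length = 0
    · have : lst = [] := List.eq_nil_of_length_eq_zero h0
      subst this
      simp [part1Go, pvDeltas]
    · by_cases h1 : lst.length = 1
      · obtain ⟨x, rfl⟩ := List.length_eq_one_iff.mp h1
        simp only [part1Go, pvDeltas]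
        by_cases e1 : x - prev = 1
        · simp [e1]
        · by_cases e3 : x - prev = 3
          · simp [e3]
          · simp [e1, e3]
      · have hn : 2 ≤ lst.length := by omega
        have htl : (lst.take (lst.length / 2)).length = lst.length / 2 := by
          rw [List.length_take]; omega
        have hleft : lst.take (lst.length / 2) ≠ [] := by
          intro e; rw [e] at htl; simp at htl; omega
        simp only [part1Go, if_neg h0, if_neg h1]
        rw [ih _ prev (by rw [htl]; omega),
            ih _ ((lst.take (lst.length / 2)).getLastD 0) (by rw [List.length_drop]; omega)]
        conv_rhs => rw [← List.take_append_drop (lst.length / 2) lst]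
        rw [pvDeltas_append, pvLastD_irrel hleft prev 0]
        simp [List.count_append]

-- ===== VERDICT (by name: the statement is the Claim_ definition above) =====
theorem part1_spec : Claim_equal_part1 := by
  intro data _
  unfold Spec_part1 part1 part1_alt
  rw [aFold_eq data [] 0, part1Go_eq data.length data 0 (Nat.le_refl _)]
  simp [PySem.List.count_eq]
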